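-- pv_equiv track=rewrite | github.com/mukunda1518/Data-Structures-Algorithms | priority_queues/kth_smallest_pencils.py | get_kth_pencil
-- ===== SOURCE A (Python) =====
-- from queue import PriorityQueue
--
-- def get_kth_pencil(labels, n, k):
--     pq = PriorityQueue()
--     for label in labels:
--         pq.put(label)
--
--     count = 1
--     while count < k:
--         interval = pq.get()
--         if interval[0] < interval[1]:
--             pq.put([interval[0] + 1, interval[1]])
--         count += 1
--     return pq.queue[0][0]
-- ===== SOURCE B (Python) =====
-- def get_kth_pencil(labels, n, k):
--     # Binary search on the answer value: count how many pencil values are <= x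
--     # by interval arithmetic, instead of popping a priority queue k-1 times.
--     lo = min(l[0] for l in labels)
--     hi = max(l[1] if l[0] < l[1] else l[0] for l in labels)
--
--     def count_le(x):
--         c = 0
--         for l in labels:
--             a, b = l[0], l[1]
--             if a < b:
--                 c += max(0, min(x, b) - a + 1)
--             else:
--                 c += 1 if a <= x else 0
--         return c
--
--     while lo < hi:
--         mid = (lo + hi) // 2
--         if count_le(mid) >= k:
--             hi = mid
--         else:
--             lo = mid + 1
--     return lo
-- ===== Notes on version B (the rewrite author's own statement) =====
-- stated objective: alternative
-- what changed: Replaces the priority-queue simulation that pops k-1 single values one at a time with a binary search on the answer value, counting values <= x by closed-form interval arithmetic.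
-- outside the precondition, e.g. on get_kth_pencil([[3]], 1, 1): A returns 3, B raises IndexError
import Mathlib
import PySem

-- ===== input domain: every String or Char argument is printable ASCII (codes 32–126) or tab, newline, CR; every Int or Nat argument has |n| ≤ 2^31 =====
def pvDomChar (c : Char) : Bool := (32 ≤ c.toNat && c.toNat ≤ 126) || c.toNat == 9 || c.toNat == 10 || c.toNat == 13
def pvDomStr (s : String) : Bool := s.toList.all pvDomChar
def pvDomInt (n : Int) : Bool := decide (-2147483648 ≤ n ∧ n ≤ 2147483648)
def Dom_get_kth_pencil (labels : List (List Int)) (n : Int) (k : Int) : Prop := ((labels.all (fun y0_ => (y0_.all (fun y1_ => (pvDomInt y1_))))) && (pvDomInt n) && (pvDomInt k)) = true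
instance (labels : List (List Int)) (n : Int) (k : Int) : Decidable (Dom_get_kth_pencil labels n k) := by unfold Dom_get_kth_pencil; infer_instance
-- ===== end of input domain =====

-- B replaces A's priority-queue simulation (k-1 pops of single values) by a binary search
-- on the answer value, counting values ≤ x per interval by closed-form arithmetic
-- (objective: alternative algorithm).

-- ===== PORT A =====
-- Python's `<` on lists of ints (lexicographic; a strict prefix is smaller).
def pvListLt : List Int → List Int → Bool
  | [], [] => false
  | [], _ :: _ => true
  | _ :: _, [] => false
  | a :: as, b :: bs => if a < b then true else if b < a then false else pvListLt as bs

-- PriorityQueue.get: remove and return the smallest element (first occurrence of it).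
def pvExtractMin : List (List Int) → Option (List Int × List (List Int))
  | [] => none
  | x :: xs =>
    match pvExtractMin xs with
    | none => some (x, [])
    | some (m, rest) => if pvListLt m x then some (m, x :: rest) else some (x, xs)

-- the `while count < k` loop: runs (k-1) times; on an empty queue Python blocks forever
-- (outside Pre_), the port just returns an empty queue there.
def pvALoop : Nat → List (List Int) → List (List Int)
  | 0, q => q
  | t + 1, q =>
    match pvExtractMin q with
    | none => []
    | some (interval, q') =>
      let i0 := (PySem.List.pyGet? interval 0).getD 0
      let i1 := (PySem.List.pyGet? interval 1).getD 0
      pvALoop t (if i0 < i1 then [i0 + 1, i1] :: q' else q')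

def get_kth_pencil (labels : List (List Int)) (n : Int) (k : Int) : Int :=
  let q := pvALoop (k - 1).toNat labels
  match pvExtractMin q with
  | some (m, _) => (PySem.List.pyGet? m 0).getD 0
  | none => 0

-- ===== PORT B =====
-- contribution of one label to count_le(x): closed-form number of its values ≤ x
def pvContrib (x : Int) (l : List Int) : Int :=
  let a := (PySem.List.pyGet? l 0).getD 0
  let b := (PySem.List.pyGet? l 1).getD 0
  if a < b then max 0 (min x b - a + 1) else if a ≤ x then 1 else 0

def pvCountLE (labels : List (List Int)) (x : Int) : Int :=
  labels.foldl (fun c l => c + pvContrib x l) 0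

def pvBSearch (labels : List (List Int)) (k : Int) (lo hi : Int) : Int :=
  if h : lo < hi then
    let mid := PySem.Int.floordiv (lo + hi) 2
    if pvCountLE labels mid ≥ k then pvBSearch labels k lo mid
    else pvBSearch labels k (mid + 1) hi
  else lo
termination_by (hi - lo).toNat
decreasing_by
  · have h1 : PySem.Int.floordiv (lo + hi) 2 < hi := by
      rw [PySem.Int.floordiv_lt_iff_lt_mul (by omega)]; omega
    have h2 : lo ≤ PySem.Int.floordiv (lo + hi) 2 := by
      rw [PySem.Int.le_floordiv_iff_mul_le (by omega)]; omega
    omega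
  · have h2 : lo ≤ PySem.Int.floordiv (lo + hi) 2 := by
      rw [PySem.Int.le_floordiv_iff_mul_le (by omega)]; omega
    omega

def get_kth_pencil_alt (labels : List (List Int)) (n : Int) (k : Int) : Int :=
  let heads := labels.map (fun l => (PySem.List.pyGet? l 0).getD 0)
  let tops := labels.map (fun l =>
    let a := (PySem.List.pyGet? l 0).getD 0
    let b := (PySem.List.pyGet? l 1).getD 0
    if a < b then b else a)
  let lo := match heads with | [] => 0 | x :: xs => xs.foldl min x
  let hi := match tops with | [] => 0 | x :: xs => xs.foldl max x
  pvBSearch labels k lo hi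

-- ===== PRECONDITION & SPEC =====
-- number of pencil values an interval [a, b] contributes ({a..b}, or {a} when a ≥ b)
def pvSize (l : List Int) : Int :=
  match l with
  | a :: b :: _ => if a < b then b - a + 1 else 1
  | _ => 1

-- Pre_ excludes labels containing a sublist shorter than 2 (A raises IndexError when it pops
-- one, or returns a head A never validated; B raises IndexError), the empty labels list
-- (both raise), and k above the total number of pencil values (A blocks forever on an
-- emptied queue or raises IndexError).
def Pre_get_kth_pencil (labels : List (List Int)) (n : Int) (k : Int) : Prop :=
  (∀ l ∈ labels, 2 ≤ l.length) ∧ labels ≠ [] ∧ k ≤ (labels.map pvSize).sum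

instance (labels : List (List Int)) (n : Int) (k : Int) : Decidable (Pre_get_kth_pencil labels n k) := by
  unfold Pre_get_kth_pencil; infer_instance

def pvWitness_get_kth_pencil : List (List Int) × Int × Int := ([[1, 3], [2, 2]], 2, 3)

def Spec_get_kth_pencil (labels : List (List Int)) (n : Int) (k : Int) (out : Int) : Prop := out = get_kth_pencil_alt labels n k
instance (labels : List (List Int)) (n : Int) (k : Int) (out : Int) : Decidable (Spec_get_kth_pencil labels n k out) := by unfold Spec_get_kth_pencil; infer_instance

-- ===== CLAIM (what is proved, stated in full; the proofs are below) =====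
def Claim_equal_get_kth_pencil : Prop := ∀ (labels : List (List Int)) (n : Int) (k : Int), Dom_get_kth_pencil labels n k → Pre_get_kth_pencil labels n k → Spec_get_kth_pencil labels n k (get_kth_pencil labels n k)


-- ===== LEMMAS AND PROOFS =====

-- The multiset of pencil values an interval contributes.
def pvVals : List Int → Multiset Int
  | a :: b :: _ =>
    if a < b then ((List.range (b - a + 1).toNat).map (fun i : Nat => a + (i : Int)) : Multiset Int)
    else {a}
  | _ => 0

def pvM (q : List (List Int)) : Multiset Int := ((q : Multiset (List Int)).map pvVals).sum

def pvSortL (q : List (List Int)) : List Int := (pvM q).sort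

-- ---- small indexing helpers ----
theorem pvGet0 (a : Int) (l : List Int) : (PySem.List.pyGet? (a :: l) 0).getD 0 = a := by
  rw [PySem.List.pyGet?_zero_cons]; rfl

theorem pvGet1 (a b : Int) (l : List Int) : (PySem.List.pyGet? (a :: b :: l) 1).getD 0 = b := by
  rw [show (1 : Int) = ((1 : Nat) : Int) from rfl,
    PySem.List.pyGet?_ofNat _ 1 (by simp)]
  rfl

-- ---- pvListLt order facts ----
theorem pvListLt_irrefl : ∀ a : List Int, pvListLt a a = false := by
  intro a; induction a with
  | nil => rfl
  | cons x xs ih => simp [pvListLt, ih]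

theorem pvListLt_asymm : ∀ a b : List Int, pvListLt a b = true → pvListLt b a = false := by
  intro a; induction a with
  | nil => intro b _; cases b <;> rfl
  | cons x xs ih =>
    intro b hab; cases b with
    | nil => simp [pvListLt] at hab
    | cons y ys =>
      simp only [pvListLt] at *
      split_ifs at hab ⊢ with h1 h2 h3 h4 <;> try omega
      · rfl
      · exact ih ys hab

theorem pvListLt_false_trans : ∀ a b c : List Int,
    pvListLt a b = false → pvListLt b c = false → pvListLt a c = false := by
  intro a; induction a with
  | nil =>
    intro b c hab hbc
    cases b with
    | nil => cases c with
      | nil => rfl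
      | cons z cs => simp [pvListLt] at hbc
    | cons y bs => simp [pvListLt] at hab
  | cons x xs ih =>
    intro b c hab hbc
    cases c with
    | nil => cases xs <;> rfl
    | cons z cs =>
      cases b with
      | nil => simp [pvListLt] at hbc
      | cons y bs =>
        simp only [pvListLt] at *
        split_ifs at hab hbc ⊢ <;>
          first | rfl | omega | exact ih bs cs hab hbc

-- head comparison: not (l < m) means head m ≤ head l
theorem pvListLt_false_head {c a : Int} {cs as : List Int}
    (h : pvListLt (c :: cs) (a :: as) = false) : a ≤ c := by
  simp only [pvListLt] at h
  split_ifs at h <;> omega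

-- ---- pvExtractMin spec ----
theorem pvExtractMin_nil_iff : ∀ q : List (List Int), pvExtractMin q = none ↔ q = [] := by
  intro q; cases q with
  | nil => simp [pvExtractMin]
  | cons x xs =>
    simp only [pvExtractMin]
    cases h : pvExtractMin xs with
    | none => simp
    | some p =>
      cases p with
      | mk m rest =>
        simp only []
        split_ifs <;> simp

theorem pvExtractMin_spec : ∀ (q : List (List Int)) (m : List Int) (q' : List (List Int)),
    pvExtractMin q = some (m, q') →
    q.Perm (m :: q') ∧ ∀ l ∈ q, pvListLt l m = false := by
  intro q; induction q with
  | nil => intro m q' h; simp [pvExtractMin] at h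
  | cons x xs ih =>
    intro m q' h
    simp only [pvExtractMin] at h
    cases hx : pvExtractMin xs with
    | none =>
      rw [hx] at h
      have hxs : xs = [] := (pvExtractMin_nil_iff xs).mp hx
      cases h
      subst hxs
      exact ⟨List.Perm.refl _, by intro l hl; simp at hl; subst hl; exact pvListLt_irrefl _⟩
    | some p =>
      rw [hx] at h
      cases p with | mk m0 rest =>
      have ihspec := ih m0 rest hx
      by_cases hlt : pvListLt m0 x = true
      · simp only [hlt, if_pos] at h
        cases h
        constructor
        · exact (ihspec.1.cons x).trans (List.Perm.swap _ _ _)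
        · intro l hl
          rcases List.mem_cons.mp hl with rfl | hl
          · exact pvListLt_asymm _ _ hlt
          · exact ihspec.2 l hl
      · simp only [Bool.not_eq_true] at hlt
        simp only [hlt] at h
        simp at h
        rcases h with ⟨rfl, rfl⟩
        constructor
        · exact List.Perm.refl _
        · intro l hl
          rcases List.mem_cons.mp hl with rfl | hl
          · exact pvListLt_irrefl _
          · exact pvListLt_false_trans l m0 x (ihspec.2 l hl) hlt

-- ---- pvVals facts ----
theorem pvVals_head_le {a : Int} {rest : List Int} {v : Int}
    (hne : 2 ≤ (a :: rest).length) (hv : v ∈ pvVals (a :: rest)) : a ≤ v := by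
  cases rest with
  | nil => simp at hne
  | cons b rs =>
    simp only [pvVals] at hv
    split_ifs at hv with hab
    · simp only [Multiset.mem_coe, List.mem_map, List.mem_range] at hv
      obtain ⟨i, _, rfl⟩ := hv
      omega
    · simp at hv; omega

theorem pvVals_le_top {a b : Int} {rs : List Int} {v : Int}
    (hv : v ∈ pvVals (a :: b :: rs)) : v ≤ if a < b then b else a := by
  simp only [pvVals] at hv
  split_ifs at hv ⊢ with hab
  · simp only [Multiset.mem_coe, List.mem_map, List.mem_range] at hv
    obtain ⟨i, hi, rfl⟩ := hv
    omega
  · simp at hv; omega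

theorem pvVals_head_mem {a b : Int} (rs : List Int) : a ∈ pvVals (a :: b :: rs) := by
  simp only [pvVals]
  split_ifs with hab
  · simp only [Multiset.mem_coe, List.mem_map, List.mem_range]
    exact ⟨0, by omega, by simp⟩
  · simp

theorem pvVals_cons {a b : Int} (rest : List Int) (hab : a < b) :
    pvVals (a :: b :: rest) = a ::ₘ pvVals [a + 1, b] := by
  have hr : pvVals [a + 1, b]
      = ((List.range (b - (a + 1) + 1).toNat).map (fun i : Nat => (a + 1) + (i : Int)) : Multiset Int) := by
    simp only [pvVals]
    split_ifs with h2
    · rfl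
    · have h1 : (b - (a + 1) + 1).toNat = 1 := by omega
      rw [h1, show List.range 1 = [0] from rfl]
      simp
  rw [hr]
  simp only [pvVals, if_pos hab]
  have hn : (b - a + 1).toNat = (b - (a + 1) + 1).toNat + 1 := by omega
  rw [hn, Multiset.cons_coe]
  congr 1
  rw [List.range_succ_eq_map, List.map_cons, List.map_map]
  congr 1
  · simp
  · apply List.map_congr_left
    intro i _
    simp only [Function.comp]
    push_cast
    ring

theorem pvVals_card {l : List Int} (hl : 2 ≤ l.length) :
    ((pvVals l).card : Int) = pvSize l := by
  cases l with
  | nil => simp at hl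
  | cons a rest =>
    cases rest with
    | nil => simp at hl
    | cons b rs =>
      simp only [pvVals, pvSize]
      split_ifs with hab
      · simp; omega
      · simp

-- ---- pvM facts ----
theorem pvM_cons (l : List Int) (q : List (List Int)) :
    pvM (l :: q) = pvVals l + pvM q := by
  simp [pvM]

theorem pvM_perm {q q' : List (List Int)} (h : q.Perm q') : pvM q = pvM q' := by
  simp [pvM, Multiset.coe_eq_coe.mpr h]

theorem pvM_card {q : List (List Int)} (hq : ∀ l ∈ q, 2 ≤ l.length) :
    ((pvM q).card : Int) = (q.map pvSize).sum := by
  induction q with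
  | nil => simp [pvM]
  | cons l ls ih =>
    rw [pvM_cons]
    simp only [List.map_cons, List.sum_cons, Multiset.card_add]
    push_cast
    rw [pvVals_card (hq l (by simp)), ih (fun x hx => hq x (by simp [hx]))]

theorem pvM_mem : ∀ (q : List (List Int)) (v : Int),
    v ∈ pvM q ↔ ∃ l ∈ q, v ∈ pvVals l := by
  intro q v
  induction q with
  | nil => simp [pvM]
  | cons l ls ih =>
    rw [pvM_cons]
    simp [ih]

-- ---- the counting function equals the filter count ----
theorem pvContrib_eq {l : List Int} (hl : 2 ≤ l.length) (x : Int) :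
    pvContrib x l = (((pvVals l).filter (· ≤ x)).card : Int) := by
  cases l with
  | nil => simp at hl
  | cons a rest =>
    cases rest with
    | nil => simp at hl
    | cons b rs =>
      simp only [pvContrib, pvVals, pvGet0, pvGet1]
      split_ifs with hab hx
      · rw [show ((List.range (b - a + 1).toNat).map (fun i : Nat => a + (i : Int)) : Multiset Int).filter (· ≤ x)
            = (((List.range (b - a + 1).toNat).map (fun i : Nat => a + (i : Int))).filter (fun v => decide (v ≤ x)) : List Int) from rfl]
        rw [Multiset.coe_card, ← List.countP_eq_length_filter, List.countP_map]
        have key : ∀ n : Nat, (List.range n).countP ((fun v => decide (v ≤ x)) ∘ (fun i : Nat => a + (i : Int)))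
            = min n (x - a + 1).toNat := by
          intro n
          induction n with
          | zero => simp
          | succ m ihm =>
            rw [List.range_succ, List.countP_append, ihm]
            simp only [List.countP_cons, List.countP_nil, Function.comp]
            split_ifs with hc <;> simp at hc <;> omega
        rw [key]
        omega
      · simp [Multiset.filter_singleton, hx]
      · simp [Multiset.filter_singleton, hx]

theorem pvCountLE_eq {labels : List (List Int)} (hl : ∀ l ∈ labels, 2 ≤ l.length) (x : Int) :
    pvCountLE labels x = (((pvM labels).filter (· ≤ x)).card : Int) := by
  unfold pvCountLE
  rw [PySem.List.foldl_add labels (pvContrib x) 0, zero_add]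
  induction labels with
  | nil => simp [pvM]
  | cons l ls ih =>
    simp only [List.map_cons, List.sum_cons]
    rw [pvM_cons, Multiset.filter_add, Multiset.card_add,
      pvContrib_eq (hl l (by simp)) x, ih (fun y hy => hl y (by simp [hy]))]
    push_cast; ring

theorem pvCountLE_mono {labels : List (List Int)} (hl : ∀ l ∈ labels, 2 ≤ l.length)
    {x y : Int} (hxy : x ≤ y) : pvCountLE labels x ≤ pvCountLE labels y := by
  rw [pvCountLE_eq hl, pvCountLE_eq hl]
  have h : ((pvM labels).filter (· ≤ x)).card ≤ ((pvM labels).filter (· ≤ y)).card := by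
    apply Multiset.card_le_card
    apply Multiset.monotone_filter_right
    intro a ha
    simp at ha ⊢
    omega
  exact_mod_cast h

-- ---- one step of A's loop ----
theorem pvStep {q : List (List Int)} {m : List Int} {q' : List (List Int)}
    (hq : ∀ l ∈ q, 2 ≤ l.length) (h : pvExtractMin q = some (m, q')) :
    ∃ a b rest, m = a :: b :: rest ∧
      (∀ l ∈ (if a < b then [a + 1, b] :: q' else q'), 2 ≤ l.length) ∧
      pvM q = a ::ₘ pvM (if a < b then [a + 1, b] :: q' else q') ∧
      (∀ v ∈ pvM q, a ≤ v) := by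
  obtain ⟨hperm, hmin⟩ := pvExtractMin_spec q m q' h
  have hmq : m ∈ q := hperm.mem_iff.mpr (by simp)
  have hmlen : 2 ≤ m.length := hq m hmq
  obtain ⟨a, b, rest, rfl⟩ : ∃ a b rest, m = a :: b :: rest := by
    cases m with
    | nil => simp at hmlen
    | cons a r => cases r with
      | nil => simp at hmlen
      | cons b rs => exact ⟨a, b, rs, rfl⟩
  have hq' : ∀ l ∈ q', 2 ≤ l.length := fun l hl => hq l (hperm.mem_iff.mpr (by simp [hl]))
  refine ⟨a, b, rest, rfl, ?_, ?_, ?_⟩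
  · intro l hl
    split_ifs at hl with hab
    · rcases List.mem_cons.mp hl with rfl | hl
      · simp
      · exact hq' l hl
    · exact hq' l hl
  · rw [pvM_perm hperm, pvM_cons]
    split_ifs with hab
    · rw [pvVals_cons rest hab, pvM_cons, Multiset.cons_add]
    · have hsing : pvVals (a :: b :: rest) = {a} := by
        simp [pvVals, hab]
      rw [hsing, Multiset.singleton_add]
  · intro v hv
    obtain ⟨l, hlq, hvl⟩ := (pvM_mem q v).mp hv
    have hllen := hq l hlq
    cases l with
    | nil => simp at hllen
    | cons c cs =>
      have hac : a ≤ c := pvListLt_false_head (hmin _ hlq)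
      have hcv : c ≤ v := pvVals_head_le hllen hvl
      omega

-- ---- A-side main induction ----
theorem pvALoop_result : ∀ (t : Nat) (q : List (List Int)),
    (∀ l ∈ q, 2 ≤ l.length) → t < (pvM q).card →
    (match pvExtractMin (pvALoop t q) with
     | some (m, _) => (PySem.List.pyGet? m 0).getD 0
     | none => 0) = (pvSortL q)[t]! := by
  intro t
  induction t with
  | zero =>
    intro q hq hcard
    have hqne : q ≠ [] := by
      intro hq0; subst hq0; simp [pvM] at hcard
    have hsome : pvExtractMin q ≠ none := fun hg => hqne ((pvExtractMin_nil_iff q).mp hg)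
    obtain ⟨p, hget⟩ := Option.ne_none_iff_exists'.mp hsome
    obtain ⟨m, q'⟩ := p
    obtain ⟨a, b, rest, rfl, _, hM, hmin⟩ := pvStep hq hget
    have hsort : pvSortL q = a :: (pvM (if a < b then [a + 1, b] :: q' else q')).sort := by
      unfold pvSortL
      rw [hM]
      have hall : ∀ y ∈ pvM (if a < b then [a + 1, b] :: q' else q'), a ≤ y :=
        fun y hy => hmin y (by rw [hM]; exact Multiset.mem_cons_of_mem hy)
      exact Multiset.sort_cons _ _ _ hall
    simp only [pvALoop, hget, hsort, List.getElem!_cons_zero, pvGet0]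
  | succ t iht =>
    intro q hq hcard
    have hqne : q ≠ [] := by
      intro hq0; subst hq0; simp [pvM] at hcard
    have hsome : pvExtractMin q ≠ none := fun hg => hqne ((pvExtractMin_nil_iff q).mp hg)
    obtain ⟨p, hget⟩ := Option.ne_none_iff_exists'.mp hsome
    obtain ⟨m, q'⟩ := p
    obtain ⟨a, b, rest, rfl, hlen', hM, hmin⟩ := pvStep hq hget
    have hsort : pvSortL q = a :: (pvM (if a < b then [a + 1, b] :: q' else q')).sort := by
      unfold pvSortL
      rw [hM]
      have hall : ∀ y ∈ pvM (if a < b then [a + 1, b] :: q' else q'), a ≤ y :=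
        fun y hy => hmin y (by rw [hM]; exact Multiset.mem_cons_of_mem hy)
      exact Multiset.sort_cons _ _ _ hall
    have hcard' : t < (pvM (if a < b then [a + 1, b] :: q' else q')).card := by
      have := congrArg Multiset.card hM
      simp at this
      omega
    have hrec := iht _ hlen' hcard'
    simp only [pvALoop, hget, pvGet0, pvGet1]
    rw [hsort, List.getElem!_cons_succ]
    exact hrec

-- ---- sorted list facts ----
theorem pvSortL_sorted (q : List (List Int)) : (pvSortL q).Pairwise (· ≤ ·) :=
  Multiset.pairwise_sort _ _

theorem pvSortL_length (q : List (List Int)) : (pvSortL q).length = (pvM q).card := by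
  simp [pvSortL]

theorem pvCount_countP {labels : List (List Int)} (hl : ∀ l ∈ labels, 2 ≤ l.length) (x : Int) :
    pvCountLE labels x = ((pvSortL labels).countP (fun v => decide (v ≤ x)) : Int) := by
  rw [pvCountLE_eq hl]
  congr 1
  have h : pvM labels = ↑(pvSortL labels) := (Multiset.sort_eq _ _).symm
  rw [h]
  rw [show ((pvSortL labels : Multiset Int)).filter (· ≤ x)
      = ↑((pvSortL labels).filter (fun v => decide (v ≤ x))) from rfl]
  rw [Multiset.coe_card, ← List.countP_eq_length_filter]

theorem pvSel_lower {s : List Int} (hs : s.Pairwise (· ≤ ·)) {t : Nat} (ht : t < s.length) :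
    t + 1 ≤ s.countP (fun v => decide (v ≤ s[t])) := by
  have hall : ∀ a ∈ s.take (t + 1), a ≤ s[t] := by
    intro a ha
    obtain ⟨i, hi, hia⟩ := List.mem_iff_getElem.mp ha
    have hi' : i < t + 1 := by
      have := hi; simp [List.length_take] at this; omega
    have hieq : a = s[i]'(by omega) := by
      rw [← hia]; exact List.getElem_take
    rcases Nat.lt_or_ge i t with hit | hit
    · rw [hieq]; exact (List.pairwise_iff_getElem.mp hs) i t (by omega) ht hit
    · have : i = t := by omega
      subst this; rw [hieq]
  calc t + 1 = (s.take (t + 1)).length := by simp [List.length_take]; omega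
    _ = (s.take (t + 1)).countP (fun v => decide (v ≤ s[t])) :=
        (List.countP_eq_length.mpr (fun a ha => by simpa using hall a ha)).symm
    _ ≤ s.countP (fun v => decide (v ≤ s[t])) :=
        (List.take_sublist _ _).countP_le
  
theorem pvSel_upper {s : List Int} (hs : s.Pairwise (· ≤ ·)) {t : Nat} (ht : t < s.length)
    {x : Int} (hx : x < s[t]) :
    s.countP (fun v => decide (v ≤ x)) ≤ t := by
  have hdrop : (s.drop t).countP (fun v => decide (v ≤ x)) = 0 := by
    rw [List.countP_eq_zero]
    intro a ha
    obtain ⟨i, hi, hia⟩ := List.mem_iff_getElem.mp ha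
    have hi' : t + i < s.length := by
      have := hi; simp [List.length_drop] at this; omega
    have hieq : a = s[t + i]'hi' := by rw [← hia]; exact List.getElem_drop ..
    have hle : s[t] ≤ s[t + i]'hi' := by
      rcases Nat.eq_zero_or_pos i with rfl | hpos
      · simp
      · exact (List.pairwise_iff_getElem.mp hs) t (t + i) ht hi' (by omega)
    simp only [decide_eq_true_eq]
    omega
  conv_lhs => rw [← List.take_append_drop t s]
  rw [List.countP_append, hdrop]
  have := List.countP_le_length (l := s.take t) (p := fun v => decide (v ≤ x))
  simp [List.length_take] at this ⊢
  omega

-- ---- binary search correctness ----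
theorem pvBSearch_eq {labels : List (List Int)} {k v : Int}
    (hge : ∀ x : Int, v ≤ x → k ≤ pvCountLE labels x) :
    ∀ (fuel : Nat) (lo hi : Int), (hi - lo).toNat ≤ fuel → lo ≤ v → v ≤ hi →
      (∀ x : Int, lo ≤ x → x < v → pvCountLE labels x < k) →
      pvBSearch labels k lo hi = v := by
  intro fuel
  induction fuel with
  | zero =>
    intro lo hi hf h1 h2 _
    rw [pvBSearch]
    rw [dif_neg (by omega)]
    omega
  | succ f ihf =>
    intro lo hi hf h1 h2 hlt
    by_cases hlohi : lo < hi
    · rw [pvBSearch, dif_pos hlohi]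
      have hmid :
          (have mid := PySem.Int.floordiv (lo + hi) 2;
            if pvCountLE labels mid ≥ k then pvBSearch labels k lo mid
            else pvBSearch labels k (mid + 1) hi)
          = (if pvCountLE labels (PySem.Int.floordiv (lo + hi) 2) ≥ k
            then pvBSearch labels k lo (PySem.Int.floordiv (lo + hi) 2)
            else pvBSearch labels k (PySem.Int.floordiv (lo + hi) 2 + 1) hi) := rfl
      rw [hmid]
      have hm1 : lo ≤ PySem.Int.floordiv (lo + hi) 2 := by
        rw [PySem.Int.le_floordiv_iff_mul_le (by omega)]; omega
      have hm2 : PySem.Int.floordiv (lo + hi) 2 < hi := by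
        rw [PySem.Int.floordiv_lt_iff_lt_mul (by omega)]; omega
      split_ifs with hcnt
      · have hvmid : v ≤ PySem.Int.floordiv (lo + hi) 2 := by
          by_contra hc
          exact absurd (hlt _ hm1 (by omega)) (not_lt.mpr hcnt)
        exact ihf lo _ (by omega) h1 hvmid hlt
      · have hmidv : PySem.Int.floordiv (lo + hi) 2 < v := by
          by_contra hc
          exact hcnt (hge _ (by omega))
        exact ihf _ hi (by omega) (by omega) h2 (fun x hx hxv => hlt x (by omega) hxv)
    · rw [pvBSearch, dif_neg hlohi]
      omega

-- ---- fold min / max bounds ----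
theorem pvFoldlMin_le_init : ∀ (xs : List Int) (x : Int), xs.foldl min x ≤ x := by
  intro xs
  induction xs with
  | nil => intro x; simp
  | cons z zs ih =>
    intro x
    simp only [List.foldl_cons]
    exact le_trans (ih (min x z)) (min_le_left x z)

theorem pvFoldlMin_le : ∀ (xs : List Int) (x y : Int), y ∈ x :: xs → xs.foldl min x ≤ y := by
  intro xs
  induction xs with
  | nil =>
    intro x y hy
    simp at hy; subst hy; simp
  | cons z zs ih =>
    intro x y hy
    simp only [List.foldl_cons]
    rcases List.mem_cons.mp hy with rfl | hy
    · exact le_trans (pvFoldlMin_le_init zs (min y z)) (min_le_left y z)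
    · rcases List.mem_cons.mp hy with rfl | hy2
      · exact le_trans (pvFoldlMin_le_init zs (min x y)) (min_le_right x y)
      · exact ih (min x z) y (List.mem_cons_of_mem _ hy2)

theorem pvFoldlMax_init_le : ∀ (xs : List Int) (x : Int), x ≤ xs.foldl max x := by
  intro xs
  induction xs with
  | nil => intro x; simp
  | cons z zs ih =>
    intro x
    simp only [List.foldl_cons]
    exact le_trans (le_max_left x z) (ih (max x z))

theorem pvFoldlMax_le : ∀ (xs : List Int) (x y : Int), y ∈ x :: xs → y ≤ xs.foldl max x := by
  intro xs
  induction xs with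
  | nil =>
    intro x y hy
    simp at hy; subst hy; simp
  | cons z zs ih =>
    intro x y hy
    simp only [List.foldl_cons]
    rcases List.mem_cons.mp hy with rfl | hy
    · exact le_trans (le_max_left y z) (pvFoldlMax_init_le zs (max y z))
    · rcases List.mem_cons.mp hy with rfl | hy2
      · exact le_trans (le_max_right x y) (pvFoldlMax_init_le zs (max x y))
      · exact ih (max x z) y (List.mem_cons_of_mem _ hy2)

theorem pvFoldlMin_mem : ∀ (xs : List Int) (x : Int), xs.foldl min x ∈ x :: xs := by
  intro xs
  induction xs with
  | nil => intro x; simp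
  | cons z zs ih =>
    intro x
    simp only [List.foldl_cons]
    rcases List.mem_cons.mp (ih (min x z)) with h | h
    · rcases min_choice x z with hm | hm <;> rw [h, hm] <;> simp
    · simp [h]

-- the first element of the sorted value list is a lower bound for every value
theorem pvSort_min {q : List (List Int)} {y : Int} (hy : y ∈ pvM q) :
    (pvSortL q)[0]! ≤ y := by
  have hy' : y ∈ pvSortL q := by
    rw [← Multiset.mem_coe]
    unfold pvSortL
    rw [Multiset.sort_eq]
    exact hy
  obtain ⟨i, hi, rfl⟩ := List.mem_iff_getElem.mp hy'
  have h0 : 0 < (pvSortL q).length := by omega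
  rw [getElem!_pos (pvSortL q) 0 h0]
  rcases Nat.eq_zero_or_pos i with rfl | hpos
  · exact le_refl _
  · exact (List.pairwise_iff_getElem.mp (pvSortL_sorted q)) 0 i h0 hi hpos

-- the initial lo of B's search is itself one of the pencil values
theorem pvLO_mem {labels : List (List Int)} (hl : ∀ l ∈ labels, 2 ≤ l.length)
    (hne : labels ≠ []) :
    (match labels.map (fun l => (PySem.List.pyGet? l 0).getD 0) with
      | [] => 0 | x :: xs => xs.foldl min x) ∈ pvM labels := by
  rcases hx : labels.map (fun l => (PySem.List.pyGet? l 0).getD 0) with _ | ⟨x, xs⟩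
  · exact absurd (List.map_eq_nil_iff.mp hx) hne
  · have hmem : xs.foldl min x ∈ labels.map (fun l => (PySem.List.pyGet? l 0).getD 0) := by
      rw [hx]; exact pvFoldlMin_mem xs x
    obtain ⟨l, hlq, hfl⟩ := List.mem_map.mp hmem
    have hllen := hl l hlq
    obtain ⟨a, b, rs, rfl⟩ : ∃ a b rs, l = a :: b :: rs := by
      cases l with
      | nil => simp at hllen
      | cons a r => cases r with
        | nil => simp at hllen
        | cons b rs => exact ⟨a, b, rs, rfl⟩
    rw [pvGet0] at hfl
    exact (pvM_mem labels _).mpr ⟨a :: b :: rs, hlq, hfl ▸ pvVals_head_mem rs⟩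

-- ---- lo / hi really bound every pencil value ----
theorem pv_bounds {labels : List (List Int)} (hl : ∀ l ∈ labels, 2 ≤ l.length)
    {v : Int} (hv : v ∈ pvM labels) :
    (match labels.map (fun l => (PySem.List.pyGet? l 0).getD 0) with
      | [] => 0 | x :: xs => xs.foldl min x) ≤ v ∧
    v ≤ (match labels.map (fun l =>
        let a := (PySem.List.pyGet? l 0).getD 0
        let b := (PySem.List.pyGet? l 1).getD 0
        if a < b then b else a) with
      | [] => 0 | x :: xs => xs.foldl max x) := by
  obtain ⟨l, hlq, hvl⟩ := (pvM_mem labels v).mp hv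
  have hllen := hl l hlq
  obtain ⟨a, b, rs, rfl⟩ : ∃ a b rs, l = a :: b :: rs := by
    cases l with
    | nil => simp at hllen
    | cons a r => cases r with
      | nil => simp at hllen
      | cons b rs => exact ⟨a, b, rs, rfl⟩
  constructor
  · have hmem : a ∈ labels.map (fun l => (PySem.List.pyGet? l 0).getD 0) :=
      List.mem_map.mpr ⟨a :: b :: rs, hlq, pvGet0 a (b :: rs)⟩
    rcases hx : labels.map (fun l => (PySem.List.pyGet? l 0).getD 0) with _ | ⟨x, xs⟩
    · rw [hx] at hmem; simp at hmem
    · rw [hx] at hmem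
      exact le_trans (pvFoldlMin_le xs x a hmem) (pvVals_head_le hllen hvl)
  · have hmem : (if a < b then b else a) ∈ labels.map (fun l =>
        let a := (PySem.List.pyGet? l 0).getD 0
        let b := (PySem.List.pyGet? l 1).getD 0
        if a < b then b else a) :=
      List.mem_map.mpr ⟨a :: b :: rs, hlq, by rw [pvGet0, pvGet1]⟩
    rcases hx : labels.map (fun l =>
        let a := (PySem.List.pyGet? l 0).getD 0
        let b := (PySem.List.pyGet? l 1).getD 0
        if a < b then b else a) with _ | ⟨x, xs⟩
    · rw [hx] at hmem; simp at hmem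
    · rw [hx] at hmem
      exact le_trans (pvVals_le_top hvl) (pvFoldlMax_le xs x _ hmem)

-- ===== VERDICT (by name: the statement is the Claim_ definition above) =====
theorem get_kth_pencil_spec : Claim_equal_get_kth_pencil := by
  intro labels n k _ hpre
  obtain ⟨hlen, hne, hktot⟩ := hpre
  unfold Spec_get_kth_pencil
  have hcardtot : ((pvM labels).card : Int) = (labels.map pvSize).sum := pvM_card hlen
  have hcardpos : 0 < (pvM labels).card := by
    obtain ⟨l0, hl0⟩ : ∃ l0, l0 ∈ labels := by
      cases labels with
      | nil => exact absurd rfl hne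
      | cons a as => exact ⟨a, by simp⟩
    have hl0len := hlen l0 hl0
    obtain ⟨a, b, rs, rfl⟩ : ∃ a b rs, l0 = a :: b :: rs := by
      cases l0 with
      | nil => simp at hl0len
      | cons a r => cases r with
        | nil => simp at hl0len
        | cons b rs => exact ⟨a, b, rs, rfl⟩
    exact Multiset.card_pos_iff_exists_mem.mpr
      ⟨a, (pvM_mem labels a).mpr ⟨_, hl0, pvVals_head_mem rs⟩⟩
  have htlt : (k - 1).toNat < (pvM labels).card := by omega
  have hA : get_kth_pencil labels n k = (pvSortL labels)[(k - 1).toNat]! := by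
    simpa [get_kth_pencil] using pvALoop_result (k - 1).toNat labels hlen htlt
  have htlt' : (k - 1).toNat < (pvSortL labels).length := by
    rw [pvSortL_length]; exact htlt
  have hvget : (pvSortL labels)[(k - 1).toNat]! = (pvSortL labels)[(k - 1).toNat]'htlt' :=
    getElem!_pos (pvSortL labels) (k - 1).toNat htlt'
  have hvmem : (pvSortL labels)[(k - 1).toNat]! ∈ pvM labels := by
    rw [hvget, ← Multiset.sort_eq (pvM labels) (fun a b : Int => a ≤ b)]
    exact Multiset.mem_coe.mpr (List.getElem_mem htlt')
  have hge : ∀ x : Int, (pvSortL labels)[(k - 1).toNat]! ≤ x → k ≤ pvCountLE labels x := by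
    intro x hvx
    have h1 : ((k - 1).toNat : Int) + 1 ≤ pvCountLE labels ((pvSortL labels)[(k - 1).toNat]!) := by
      rw [pvCount_countP hlen, hvget]
      exact_mod_cast pvSel_lower (pvSortL_sorted labels) htlt'
    have h2 := pvCountLE_mono hlen hvx
    omega
  have hbounds := pv_bounds hlen hvmem
  have hlt : ∀ x : Int,
      (match labels.map (fun l => (PySem.List.pyGet? l 0).getD 0) with
        | [] => 0 | x :: xs => xs.foldl min x) ≤ x →
      x < (pvSortL labels)[(k - 1).toNat]! → pvCountLE labels x < k := by
    intro x hlox hxv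
    by_cases hk : 1 ≤ k
    · have h1 : pvCountLE labels x ≤ ((k - 1).toNat : Int) := by
        rw [pvCount_countP hlen x]
        exact_mod_cast pvSel_upper (pvSortL_sorted labels) htlt' (by rw [← hvget]; exact hxv)
      omega
    · -- k ≤ 0: then (k-1).toNat = 0 and lo is itself the smallest value, so no such x exists
      exfalso
      have ht0 : (k - 1).toNat = 0 := by omega
      have hvlo := pvSort_min (pvLO_mem hlen hne)
      rw [ht0] at hxv
      omega
  rw [hA]
  simp only [get_kth_pencil_alt]
  exact (pvBSearch_eq hge _ _ _ le_rfl hbounds.1 hbounds.2 hlt).symm
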